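-- pv_equiv track=rewrite | github.com/hsiehphLab/ferromic-lab | cds/axt_to_phy.py | normalize_chromosome
-- ===== SOURCE A (Python) =====
-- CHR_PREFIX = "chr"
--
-- def normalize_chromosome(raw):
--     """Normalize chromosome identifiers to canonical 'chr*' form."""
--     if raw is None:
--         return None
--
--     chrom = str(raw).strip()
--     if not chrom:
--         return None
--
--     # Strip any repeated 'chr' prefixes (case-insensitive)
--     while chrom.lower().startswith(CHR_PREFIX):
--         chrom = chrom[3:]
--         chrom = chrom.strip()
--         if not chrom:
--             return None
--
--     chrom_lower = chrom.lower()
--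
--     if chrom_lower in {"m", "mt", "mtdna", "mito", "mitochondrial"}:
--         core = "M"
--     elif chrom_lower == "x":
--         core = "X"
--     elif chrom_lower == "y":
--         core = "Y"
--     elif chrom_lower.isdigit():
--         try:
--             core = str(int(chrom_lower))
--         except ValueError:
--             core = chrom_lower
--     else:
--         core = chrom.upper()
--
--     return f"{CHR_PREFIX}{core}"
-- ===== SOURCE B (Python) =====
-- CHR_PREFIX = "chr"
--
-- _SPECIAL = {"m": "M", "mt": "M", "mtdna": "M", "mito": "M",
--             "mitochondrial": "M", "x": "X", "y": "Y"}
--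
-- def normalize_chromosome(raw):
--     """Normalize chromosome identifiers to canonical 'chr*' form."""
--     if raw is None:
--         return None
--
--     s = str(raw).strip()
--
--     # Single index scan over s: hop over every repeated (case-insensitive)
--     # 'chr' prefix and the whitespace after it, without rebuilding strings.
--     i = 0
--     while s[i:i + 3].lower() == CHR_PREFIX:
--         i += 3
--         while i < len(s) and s[i].isspace():
--             i += 1
--
--     core = s[i:]
--     if not core:
--         return None
--
--     low = core.lower()
--     if low in _SPECIAL:
--         core = _SPECIAL[low]
--     elif low.isdigit():
--         core = str(int(low))
--     else:
--         core = core.upper()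
--
--     return f"{CHR_PREFIX}{core}"
-- ===== Notes on version B (the rewrite author's own statement) =====
-- stated objective: alternative
-- what changed: The loop that repeatedly rebuilds the string (slice off the three-character prefix, re-strip, repeat) is replaced by a single index scan over the stripped string that hops over each prefix and the whitespace after it, and the if/elif special-case chain is replaced by a lookup table.
import Mathlib
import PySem

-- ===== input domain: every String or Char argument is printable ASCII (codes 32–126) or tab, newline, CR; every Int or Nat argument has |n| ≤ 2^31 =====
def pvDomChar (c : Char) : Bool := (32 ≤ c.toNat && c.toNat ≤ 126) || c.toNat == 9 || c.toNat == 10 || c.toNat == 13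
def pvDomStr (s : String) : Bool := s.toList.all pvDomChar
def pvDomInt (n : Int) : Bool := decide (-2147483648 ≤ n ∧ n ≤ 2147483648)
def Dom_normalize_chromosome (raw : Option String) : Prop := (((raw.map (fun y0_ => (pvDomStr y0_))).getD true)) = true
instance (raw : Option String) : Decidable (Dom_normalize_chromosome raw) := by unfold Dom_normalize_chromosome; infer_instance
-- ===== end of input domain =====

-- B rewrites A's rebuild-the-string prefix loop (slice off the prefix, re-strip, repeat) as a
-- single index scan over the stripped string, and the if/elif special-case chain as a table lookup.

-- ===== PORT A =====

-- termination helper for A's while loop (cited by decreasing_by)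
theorem pvALoop_dec (chrom : List Char)
    (h : PySem.Chars.startswith (PySem.Chars.lower chrom) ['c','h','r'] = true) :
    (PySem.Chars.strip (PySem.List.slice chrom (some 3) none)).length < chrom.length := by
  rw [PySem.Chars.startswith_iff] at h
  have h3 : 3 ≤ chrom.length := by
    have := h.length_le
    simpa [PySem.Chars.lower] using this
  have hs : (PySem.Chars.strip (PySem.List.slice chrom (some 3) none)).length ≤ chrom.length - 3 := by
    rw [PySem.List.slice_from chrom (by norm_num)]
    calc (PySem.Chars.strip (chrom.drop (3:Int).toNat)).length
        ≤ (chrom.drop (3:Int).toNat).length := by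
          unfold PySem.Chars.strip PySem.Chars.rstrip PySem.Chars.lstrip
          have h1 := List.length_dropWhile_le PySem.Chars.isspace (chrom.drop (3:Int).toNat)
          have h2 := List.length_dropWhile_le PySem.Chars.isspace
            (List.dropWhile PySem.Chars.isspace (chrom.drop (3:Int).toNat)).reverse
          simp only [List.length_reverse] at *
          omega
      _ = chrom.length - 3 := by simp
  omega

-- while chrom.lower().startswith("chr"): chrom = chrom[3:].strip(); if not chrom: return None
def pvALoop (chrom : List Char) : Option (List Char) :=
  if h : PySem.Chars.startswith (PySem.Chars.lower chrom) ['c','h','r'] = true then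
    let c' := PySem.Chars.strip (PySem.List.slice chrom (some 3) none)
    if c' = [] then none else pvALoop c'
  else some chrom
termination_by chrom.length
decreasing_by exact pvALoop_dec chrom h

-- the classification after the loop (if/elif chain)
def pvAClassify (chrom : List Char) : List Char :=
  let low := PySem.Chars.lower chrom
  if low ∈ [['m'],['m','t'],['m','t','d','n','a'],['m','i','t','o'],
            ['m','i','t','o','c','h','o','n','d','r','i','a','l']] then ['M']
  else if low = ['x'] then ['X']
  else if low = ['y'] then ['Y']
  else if PySem.Chars.strIsdigit low then
    match PySem.Int.ofChars? low with    -- try: str(int(low)) except ValueError: low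
    | some n => PySem.Int.toChars n
    | none => low
  else PySem.Chars.upper chrom

def normalize_chromosome (raw : Option String) : Option String :=
  match raw with
  | none => none
  | some r =>
    let chrom := PySem.Chars.strip r.toList
    if chrom = [] then none
    else
      match pvALoop chrom with
      | none => none
      | some u => some (String.ofList (['c','h','r'] ++ pvAClassify u))

-- ===== PORT B =====

-- inner while: while i < len(s) and s[i].isspace(): i += 1
def pvSkipWs (s : List Char) (i : Nat) : Nat :=
  if h : i < s.length then
    if PySem.Chars.isspace (s[i]'h) = true then pvSkipWs s (i + 1) else i
  else i
termination_by s.length - i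
decreasing_by omega

theorem pvSkipWs_ge (s : List Char) (i : Nat) : i ≤ pvSkipWs s i := by
  fun_induction pvSkipWs s i with
  | _ => omega

-- termination helper for B's scan (cited by decreasing_by)
theorem pvBScan_dec (s : List Char) (i : Nat)
    (h : PySem.Chars.lower (PySem.List.slice s (some (i:Int)) (some ((i:Int)+3))) = ['c','h','r']) :
    s.length - pvSkipWs s (i + 3) < s.length - i := by
  have hlen : (PySem.List.slice s (some (i:Int)) (some ((i:Int)+3))).length = 3 := by
    have := congrArg List.length h
    simpa [PySem.Chars.lower] using this
  rw [PySem.List.slice_toNat s (by positivity) (by positivity)] at hlen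
  have h3 : i + 3 ≤ s.length := by
    have hd : ((i:Int)).toNat = i := by omega
    have hb : (((i:Int)+3)).toNat = i + 3 := by omega
    rw [hd, hb, List.length_take, List.length_drop] at hlen
    omega
  have := pvSkipWs_ge s (i + 3)
  omega

-- outer while: while s[i:i+3].lower() == "chr": i += 3; <skip whitespace>
def pvBScan (s : List Char) (i : Nat) : Nat :=
  if h : PySem.Chars.lower (PySem.List.slice s (some (i:Int)) (some ((i:Int)+3))) = ['c','h','r'] then
    pvBScan s (pvSkipWs s (i + 3))
  else i
termination_by s.length - i
decreasing_by exact pvBScan_dec s i h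

-- _SPECIAL lookup table
def pvSpecial : PySem.Dict (List Char) (List Char) :=
  PySem.Dict.mk [(['m'],['M']),(['m','t'],['M']),(['m','t','d','n','a'],['M']),
                 (['m','i','t','o'],['M']),
                 (['m','i','t','o','c','h','o','n','d','r','i','a','l'],['M']),
                 (['x'],['X']),(['y'],['Y'])]

def pvBClassify (core : List Char) : List Char :=
  let low := PySem.Chars.lower core
  match pvSpecial.get? low with
  | some c => c
  | none =>
    if PySem.Chars.strIsdigit low then
      match PySem.Int.ofChars? low with    -- str(int(low)); int() cannot raise here (low is nonempty ASCII digits), the none branch is unreachable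
      | some n => PySem.Int.toChars n
      | none => low
    else PySem.Chars.upper core

def normalize_chromosome_alt (raw : Option String) : Option String :=
  match raw with
  | none => none
  | some r =>
    let s := PySem.Chars.strip r.toList
    let core := PySem.List.slice s (some ((pvBScan s 0 : Nat) : Int)) none
    if core = [] then none
    else some (String.ofList (['c','h','r'] ++ pvBClassify core))

-- ===== PRECONDITION & SPEC =====
def Spec_normalize_chromosome (raw : Option String) (out : Option String) : Prop := out = normalize_chromosome_alt raw
instance (raw : Option String) (out : Option String) : Decidable (Spec_normalize_chromosome raw out) := by unfold Spec_normalize_chromosome; infer_instance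

-- ===== CLAIM (what is proved, stated in full; the proofs are below) =====
def Claim_equal_normalize_chromosome : Prop := ∀ (raw : Option String), Dom_normalize_chromosome raw → Spec_normalize_chromosome raw (normalize_chromosome raw)

-- ===== LEMMAS AND PROOFS =====

-- the two classifications agree
theorem classify_eq (u : List Char) : pvAClassify u = pvBClassify u := by
  unfold pvAClassify pvBClassify pvSpecial
  simp only [PySem.Dict.get?_mk_cons, List.mem_cons, List.not_mem_nil, or_false, beq_iff_eq]
  by_cases h1 : PySem.Chars.lower u = ['m'] <;>
  by_cases h2 : PySem.Chars.lower u = ['m','t'] <;>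
  by_cases h3 : PySem.Chars.lower u = ['m','t','d','n','a'] <;>
  by_cases h4 : PySem.Chars.lower u = ['m','i','t','o'] <;>
  by_cases h5 : PySem.Chars.lower u = ['m','i','t','o','c','h','o','n','d','r','i','a','l'] <;>
  by_cases h6 : PySem.Chars.lower u = ['x'] <;>
  by_cases h7 : PySem.Chars.lower u = ['y'] <;>
  simp_all [PySem.Dict.get?]
  rw [if_neg (show ¬(['m'] = PySem.Chars.lower u) from fun h => h1 h.symm),
      if_neg (show ¬(['m','t'] = PySem.Chars.lower u) from fun h => h2 h.symm),
      if_neg (show ¬(['m','t','d','n','a'] = PySem.Chars.lower u) from fun h => h3 h.symm),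
      if_neg (show ¬(['m','i','t','o'] = PySem.Chars.lower u) from fun h => h4 h.symm),
      if_neg (show ¬(['m','i','t','o','c','h','o','n','d','r','i','a','l'] = PySem.Chars.lower u) from fun h => h5 h.symm),
      if_neg (show ¬(['x'] = PySem.Chars.lower u) from fun h => h6 h.symm),
      if_neg (show ¬(['y'] = PySem.Chars.lower u) from fun h => h7 h.symm)]

-- skipping whitespace by index is lstrip of the suffix
theorem skipWs_drop (s : List Char) (i : Nat) :
    s.drop (pvSkipWs s i) = PySem.Chars.lstrip (s.drop i) := by
  fun_induction pvSkipWs s i with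
  | case1 i h hsp ih =>
    rw [ih, PySem.Chars.lstrip, PySem.Chars.lstrip,
        List.drop_eq_getElem_cons h, List.dropWhile_cons_of_pos hsp]
  | case2 i h hsp =>
    rw [PySem.Chars.lstrip, List.drop_eq_getElem_cons h,
        List.dropWhile_cons_of_neg (by simpa using hsp)]
  | case3 i h =>
    have : s.drop i = [] := List.drop_eq_nil_of_le (by omega)
    simp [this, PySem.Chars.lstrip]

theorem pvSkipWs_le (s : List Char) (i : Nat) (h : i ≤ s.length) : pvSkipWs s i ≤ s.length := by
  fun_induction pvSkipWs s i with
  | case1 i h hsp ih => exact ih (by omega)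
  | case2 i h hsp => omega
  | case3 i h => omega

-- a suffix of a right-stripped list is right-stripped
theorem rstrip_suffix (s t : List Char) (h : PySem.Chars.rstrip s = s) (hs : t <:+ s) :
    PySem.Chars.rstrip t = t := by
  unfold PySem.Chars.rstrip at *
  have hrev : List.dropWhile PySem.Chars.isspace s.reverse = s.reverse := by
    have := congrArg List.reverse h
    simpa using this
  rw [List.dropWhile_eq_self_iff] at hrev
  have hpre : t.reverse <+: s.reverse := List.reverse_prefix.mpr hs
  suffices hh : List.dropWhile PySem.Chars.isspace t.reverse = t.reverse by
    rw [hh, List.reverse_reverse]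
  rw [List.dropWhile_eq_self_iff]
  intro hl
  have hlen : 0 < s.reverse.length := Nat.lt_of_lt_of_le hl hpre.length_le
  have h0 : t.reverse[0]'hl = s.reverse[0]'hlen := hpre.getElem hl
  rw [h0]
  exact hrev _

-- A's loop condition at a suffix equals B's scan condition at the index
theorem cond_eq (s : List Char) (i : Nat) :
    (PySem.Chars.lower (PySem.List.slice s (some (i:Int)) (some ((i:Int)+3))) = ['c','h','r'])
      ↔ PySem.Chars.startswith (PySem.Chars.lower (s.drop i)) ['c','h','r'] = true := by
  rw [PySem.List.slice_toNat s (by positivity) (by positivity)]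
  have h1 : (((i:Int))+3).toNat - ((i:Int)).toNat = 3 := by omega
  have h2 : ((i:Int)).toNat = i := by omega
  rw [h1, h2, PySem.Chars.startswith_iff, List.prefix_iff_eq_take]
  unfold PySem.Chars.lower
  rw [← List.map_take]
  simp [eq_comm]

-- A's loop condition forces at least 3 remaining characters
theorem cond_len (s : List Char) (i : Nat) (hi : i ≤ s.length)
    (h : PySem.Chars.startswith (PySem.Chars.lower (s.drop i)) ['c','h','r'] = true) :
    i + 3 ≤ s.length := by
  rw [PySem.Chars.startswith_iff] at h
  have := h.length_le
  simp [PySem.Chars.lower] at this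
  omega

theorem lstrip_prefix (t u : List Char) (h : PySem.Chars.lstrip t = t) (hp : u <+: t) :
    PySem.Chars.lstrip u = u := by
  unfold PySem.Chars.lstrip at *
  rw [List.dropWhile_eq_self_iff] at h ⊢
  intro hl
  have hlen : 0 < t.length := Nat.lt_of_lt_of_le hl hp.length_le
  have h0 : u[0]'hl = t[0]'hlen := hp.getElem hl
  rw [h0]
  exact h _

-- strip leaves a string that is both left- and right-stripped
theorem lstrip_strip (x : List Char) : PySem.Chars.lstrip (PySem.Chars.strip x) = PySem.Chars.strip x := by
  unfold PySem.Chars.strip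
  refine lstrip_prefix (PySem.Chars.lstrip x) _ ?_ ?_
  · unfold PySem.Chars.lstrip
    exact List.dropWhile_idempotent _ _
  · unfold PySem.Chars.rstrip
    conv_rhs => rw [← List.reverse_reverse (PySem.Chars.lstrip x)]
    exact List.reverse_prefix.mpr (List.dropWhile_suffix _)

theorem rstrip_strip (x : List Char) : PySem.Chars.rstrip (PySem.Chars.strip x) = PySem.Chars.strip x := by
  unfold PySem.Chars.strip PySem.Chars.rstrip
  simp [List.dropWhile_idempotent]

-- main correspondence: A's loop on the suffix = B's scan from the index
theorem loop_scan (s : List Char) (hr : PySem.Chars.rstrip s = s) :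
    ∀ i, i ≤ s.length → PySem.Chars.lstrip (s.drop i) = s.drop i →
      s.drop (pvBScan s i) = (pvALoop (s.drop i)).getD [] := by
  intro i
  fun_induction pvBScan s i with
  | case1 i hc ih =>
    intro hi hls
    have hA : PySem.Chars.startswith (PySem.Chars.lower (s.drop i)) ['c','h','r'] = true :=
      (cond_eq s i).mp hc
    have h3 : i + 3 ≤ s.length := cond_len s i hi hA
    have hsuf : PySem.Chars.lstrip (s.drop (i+3)) <:+ s :=
      (List.dropWhile_suffix _).trans (List.drop_suffix _ s)
    have hcalc : PySem.Chars.strip (PySem.List.slice (s.drop i) (some 3) none)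
        = s.drop (pvSkipWs s (i + 3)) := by
      rw [PySem.List.slice_from _ (by norm_num)]
      have hdd : (s.drop i).drop ((3:Int)).toNat = s.drop (i + 3) := by
        rw [List.drop_drop]; rfl
      rw [hdd, skipWs_drop s (i+3)]
      exact rstrip_suffix s _ hr hsuf
    rw [pvALoop, dif_pos hA, hcalc]
    have hile : pvSkipWs s (i+3) ≤ s.length := pvSkipWs_le s (i+3) h3
    have hls' : PySem.Chars.lstrip (s.drop (pvSkipWs s (i+3))) = s.drop (pvSkipWs s (i+3)) := by
      rw [skipWs_drop s (i+3)]
      unfold PySem.Chars.lstrip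
      exact List.dropWhile_idempotent _ _
    by_cases hnil : s.drop (pvSkipWs s (i+3)) = []
    · rw [if_pos hnil, pvBScan,
        dif_neg (by rw [cond_eq]; simp [hnil, PySem.Chars.startswith_iff, PySem.Chars.lower])]
      exact hnil
    · rw [if_neg hnil]
      exact ih hile hls'
  | case2 i hc =>
    intro hi hls
    rw [pvALoop, dif_neg (by rw [← cond_eq s i]; exact hc)]
    rfl

theorem pvALoop_ne_nil (t u : List Char) (h : pvALoop t = some u) (ht : t ≠ []) : u ≠ [] := by
  fun_induction pvALoop t with
  | case1 t hc c' hnil => simp_all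
  | case2 t hc c' hnil ih => exact fun hu => ih h hnil hu
  | case3 t hc =>
    obtain rfl : t = u := by simpa using h
    exact ht

-- ===== VERDICT (by name: the statement is the Claim_ definition above) =====
theorem normalize_chromosome_spec : Claim_equal_normalize_chromosome := by
  intro raw _
  unfold Spec_normalize_chromosome normalize_chromosome normalize_chromosome_alt
  cases raw with
  | none => rfl
  | some r =>
    simp only
    have hr : PySem.Chars.rstrip (PySem.Chars.strip r.toList) = PySem.Chars.strip r.toList :=
      rstrip_strip r.toList
    have hcore : PySem.List.slice (PySem.Chars.strip r.toList)
        (some ((pvBScan (PySem.Chars.strip r.toList) 0 : Nat) : Int)) none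
        = (pvALoop (PySem.Chars.strip r.toList)).getD [] := by
      rw [PySem.List.slice_from _ (by positivity)]
      have h0 : (((pvBScan (PySem.Chars.strip r.toList) 0 : Nat) : Int)).toNat
          = pvBScan (PySem.Chars.strip r.toList) 0 := by omega
      rw [h0]
      have := loop_scan (PySem.Chars.strip r.toList) hr 0 (by omega)
        (by simpa using lstrip_strip r.toList)
      simpa using this
    by_cases hnil : PySem.Chars.strip r.toList = []
    · rw [if_pos hnil]
      have : pvALoop ([] : List Char) = some [] := by
        rw [pvALoop, dif_neg (by simp [PySem.Chars.startswith_iff, PySem.Chars.lower])]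
      rw [if_pos (by rw [hcore, hnil, this]; rfl)]
    · rw [if_neg hnil]
      cases hA : pvALoop (PySem.Chars.strip r.toList) with
      | none => rw [if_pos (by rw [hcore, hA]; rfl)]
      | some u =>
        have hu : u ≠ [] := pvALoop_ne_nil _ u hA hnil
        rw [if_neg (by rw [hcore, hA]; simpa using hu)]
        have hceq : PySem.List.slice (PySem.Chars.strip r.toList)
            (some ((pvBScan (PySem.Chars.strip r.toList) 0 : Nat) : Int)) none = u := by
          rw [hcore, hA]; rfl
        rw [hceq, ← classify_eq u]
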